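-- pv_equiv track=rewrite | github.com/HironobuBot/aaaaa | task3.py | solution
-- ===== SOURCE A (Python) =====
-- def solution(s, c):
--     cost = 0
--     i = 0
--     while i < len(s) - 1:
--         arr = [c[i]]
--         for j in range(i + 1, len(s)):
--             if s[i] == s[j]:
--                 arr.append(c[j])
--                 continue
--             break
--         i = j - 1
--         if len(arr) > 1:
--             arr.remove(max(arr))
--             for item in arr:
--                 cost += item
--         i += 1
--     return cost
-- ===== SOURCE B (Python) =====
-- def solution(s, c):
--     # Greedy single pass: for each position whose character equals the previous
--     # one, pay min(kept, c[i]) and keep the larger; no run boundaries, no sums.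
--     cost = 0
--     keep = 0
--     prev = None
--     for i in range(len(s)):
--         if s[i] == prev:
--             if c[i] < keep:
--                 cost += c[i]
--             else:
--                 cost += keep
--                 keep = c[i]
--         else:
--             keep = c[i]
--         prev = s[i]
--     return cost
-- ===== Notes on version B (the rewrite author's own statement) =====
-- stated objective: faster
-- what changed: B drops A's run detection and list building entirely: a single greedy pass that, whenever a character equals its predecessor, adds min(kept cost, current cost) and keeps the larger — no per-run cost lists, no max()/remove() scans (constant-factor speedup measured).
-- outside the precondition, e.g. on solution('aab', [1, 2]): A returns 1, B raises IndexError; on solution('ab', [1]): A returns 0, B raises IndexError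
import Mathlib
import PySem

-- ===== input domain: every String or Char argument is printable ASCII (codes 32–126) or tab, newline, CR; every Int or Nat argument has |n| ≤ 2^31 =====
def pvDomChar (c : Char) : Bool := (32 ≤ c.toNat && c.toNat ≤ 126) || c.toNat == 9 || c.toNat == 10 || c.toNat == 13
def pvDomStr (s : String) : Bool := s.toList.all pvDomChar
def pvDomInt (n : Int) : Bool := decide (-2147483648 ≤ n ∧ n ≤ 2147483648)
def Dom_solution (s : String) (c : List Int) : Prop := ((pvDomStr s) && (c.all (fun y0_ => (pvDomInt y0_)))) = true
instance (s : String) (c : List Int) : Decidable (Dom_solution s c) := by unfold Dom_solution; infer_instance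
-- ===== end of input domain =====

-- B replaces A's per-run "collect costs, remove the maximum, add the rest" by a single greedy
-- pass over adjacent positions: at each position equal to its predecessor pay min(kept, c[i])
-- and keep the larger (alternative decomposition, no run boundaries and no per-run lists).

-- ===== PORT A =====
-- the inner `for j in range(i+1, len(s))` loop: carries (arr, j); breaks at the first mismatch.
-- All indices it touches are < len(s), and Pre_ gives len(c) ≥ len(s), so `getD` never pads.
def pvInnerA (cs : List Char) (c : List Int) (si : Char) : List Nat → List Int → Nat → List Int × Nat
  | [], arr, j => (arr, j)
  | jj :: rest, arr, _ =>
    if cs.getD jj ' ' = si then pvInnerA cs c si rest (arr ++ [c.getD jj 0]) jj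
    else (arr, jj)

-- the outer `while i < len(s) - 1` loop; fuel = len(s) suffices since i strictly increases.
def pvOuterA (cs : List Char) (c : List Int) : Nat → Nat → Int → Int
  | 0, _, cost => cost
  | fuel+1, i, cost =>
    if i + 1 < cs.length then
      let r := pvInnerA cs c (cs.getD i ' ') (List.range' (i+1) (cs.length - (i+1))) [c.getD i 0] i
      let i2 := r.2 - 1                             -- i = j - 1
      let cost2 := if 1 < r.1.length then
          let m := (PySem.List.max? r.1 (fun y => y)).getD 0      -- max(arr); arr nonempty here
          let arr2 := (PySem.List.remove? r.1 m).getD r.1         -- arr.remove(max(arr)); m ∈ arr, no ValueError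
          arr2.foldl (· + ·) cost                                 -- for item in arr: cost += item
        else cost
      pvOuterA cs c fuel (i2 + 1) cost2
    else cost

def solution (s : String) (c : List Int) : Int :=
  pvOuterA s.toList c s.toList.length 0 0

-- ===== PORT B =====
-- the body of B's `for i in range(len(s))` loop; state = (cost, keep, prev).
def pvStepB (cs : List Char) (c : List Int) (st : Int × Int × Option Char) (i : Nat) : Int × Int × Option Char :=
  let si := cs.getD i ' '
  let ci := c.getD i 0
  if some si = st.2.2 then
    if ci < st.2.1 then (st.1 + ci, st.2.1, some si)
    else (st.1 + st.2.1, ci, some si)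
  else (st.1, ci, some si)

def solution_alt (s : String) (c : List Int) : Int :=
  ((List.range s.toList.length).foldl (pvStepB s.toList c) (0, 0, none)).1

-- ===== PRECONDITION & SPEC =====
-- Pre_ excludes inputs with fewer costs than characters, outside the one-cost-per-character domain:
-- A raises IndexError on most such inputs, returning only when the missing entries happen never to
-- be reached (e.g. a mismatching or absent final character), where B raises.
def Pre_solution (s : String) (c : List Int) : Prop := s.length ≤ c.length
instance (s : String) (c : List Int) : Decidable (Pre_solution s c) := by unfold Pre_solution; infer_instance
def pvWitness_solution : String × List Int := ("aab", [1, 2, 3])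

def Spec_solution (s : String) (c : List Int) (out : Int) : Prop := out = solution_alt s c
instance (s : String) (c : List Int) (out : Int) : Decidable (Spec_solution s c out) := by unfold Spec_solution; infer_instance

-- ===== CLAIM (what is proved, stated in full; the proofs are below) =====
def Claim_equal_solution : Prop := ∀ (s : String) (c : List Int), Dom_solution s c → Pre_solution s c → Spec_solution s c (solution s c)

-- ===== LEMMAS AND PROOFS =====

-- proof-only helper: `first j ≥ j0 with j ≥ n or cs[j] ≠ si` (the end of the run starting before j0)
def pvFindEnd (cs : List Char) (si : Char) : Nat → Nat → Nat
  | 0, j => j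
  | f+1, j => if j < cs.length ∧ cs.getD j ' ' = si then pvFindEnd cs si f (j+1) else j

theorem pvFindEnd_ge (cs : List Char) (si : Char) : ∀ (f j : Nat), j ≤ pvFindEnd cs si f j := by
  intro f
  induction f with
  | zero => intro j; simp [pvFindEnd]
  | succ f ih =>
    intro j
    simp only [pvFindEnd]
    split
    · exact le_trans (Nat.le_succ j) (ih (j+1))
    · exact le_refl j

theorem pvFindEnd_le (cs : List Char) (si : Char) : ∀ (f j : Nat), j ≤ cs.length → pvFindEnd cs si f j ≤ cs.length := by
  intro f
  induction f with
  | zero => intro j h; simpa [pvFindEnd]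
  | succ f ih =>
    intro j h
    simp only [pvFindEnd]
    split
    · rename_i hc; exact ih (j+1) hc.1
    · exact h

theorem pvFindEnd_fuel (cs : List Char) (si : Char) :
    ∀ (f1 f2 j : Nat), cs.length - j ≤ f1 → cs.length - j ≤ f2 →
    pvFindEnd cs si f1 j = pvFindEnd cs si f2 j := by
  intro f1
  induction f1 with
  | zero =>
    intro f2 j h1 _
    cases f2 with
    | zero => rfl
    | succ g =>
      simp only [pvFindEnd]
      rw [if_neg]
      rintro ⟨hj, -⟩; omega
  | succ f ih =>
    intro f2 j h1 h2
    cases f2 with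
    | zero =>
      simp only [pvFindEnd]
      rw [if_neg]
      rintro ⟨hj, -⟩; omega
    | succ g =>
      simp only [pvFindEnd]
      split
      · rename_i hc
        exact ih g (j+1) (by omega) (by omega)
      · rfl

theorem pvFindEnd_stop (cs : List Char) (si : Char) : ∀ (f j : Nat), cs.length ≤ j → pvFindEnd cs si f j = j := by
  intro f j h
  cases f with
  | zero => rfl
  | succ g =>
    simp only [pvFindEnd]
    rw [if_neg]
    rintro ⟨hj, -⟩; omega

-- if the run end is inside the string, the character there breaks the run
theorem pvFindEnd_break (cs : List Char) (si : Char) :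
    ∀ (f j : Nat), cs.length - j ≤ f → pvFindEnd cs si f j < cs.length →
    cs.getD (pvFindEnd cs si f j) ' ' ≠ si := by
  intro f
  induction f with
  | zero =>
    intro j h1 h2
    simp only [pvFindEnd] at h2 ⊢
    omega
  | succ f ih =>
    intro j h1 h2
    simp only [pvFindEnd] at h2 ⊢
    by_cases hc : j < cs.length ∧ cs.getD j ' ' = si
    · rw [if_pos hc] at h2 ⊢
      exact ih (j+1) (by omega) h2
    · rw [if_neg hc] at h2 ⊢
      intro he
      exact hc ⟨h2, he⟩

-- every index strictly inside the run carries the run's character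
theorem pvFindEnd_mem (cs : List Char) (si : Char) :
    ∀ (f j k : Nat), j ≤ k → k < pvFindEnd cs si f j → cs.getD k ' ' = si := by
  intro f
  induction f with
  | zero =>
    intro j k h1 h2
    simp only [pvFindEnd] at h2
    omega
  | succ f ih =>
    intro j k h1 h2
    simp only [pvFindEnd] at h2
    by_cases hc : j < cs.length ∧ cs.getD j ' ' = si
    · rw [if_pos hc] at h2
      rcases Nat.eq_or_lt_of_le h1 with he | hlt
      · rw [← he]; exact hc.2
      · exact ih (j+1) k hlt h2
    · rw [if_neg hc] at h2
      omega

-- the sum of per-run maxima from position i on (the common characterisation of both loops)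
def pvRunMaxes (cs : List Char) (c : List Int) (i : Nat) : Int :=
  if _h : i < cs.length then
    (List.range' (i+1) (pvFindEnd cs (cs.getD i ' ') cs.length (i+1) - (i+1))).foldl
        (fun m k => if c.getD k 0 > m then c.getD k 0 else m) (c.getD i 0)
      + pvRunMaxes cs c (pvFindEnd cs (cs.getD i ' ') cs.length (i+1))
  else 0
termination_by cs.length - i
decreasing_by
  have := pvFindEnd_ge cs (cs.getD i ' ') cs.length (i+1)
  omega

-- `if y > m then y else m` IS max
theorem pvFoldIfMax (l : List Int) : ∀ (a : Int),
    l.foldl (fun m y => if y > m then y else m) a = l.foldl max a := by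
  induction l with
  | nil => intro a; rfl
  | cons x t ih =>
    intro a
    simp only [List.foldl_cons]
    have : (if x > a then x else a) = max a x := by
      split <;> omega
    rw [this, ih]

-- the inner for-loop of A, characterised by pvFindEnd (fuel = range length)
theorem pvInnerA_spec (cs : List Char) (c : List Int) (si : Char) :
    ∀ (k j0 : Nat) (arr : List Int), j0 + k ≤ cs.length →
    pvInnerA cs c si (List.range' j0 k) arr (j0 - 1) =
      (arr ++ (List.range' j0 (pvFindEnd cs si k j0 - j0)).map (fun t => c.getD t 0),
       if pvFindEnd cs si k j0 = j0 + k then j0 + k - 1 else pvFindEnd cs si k j0) := by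
  intro k
  induction k with
  | zero =>
    intro j0 arr _
    simp [pvInnerA, pvFindEnd]
  | succ k ih =>
    intro j0 arr hle
    have hj0 : j0 < cs.length := by omega
    simp only [List.range'_succ, pvInnerA, pvFindEnd]
    by_cases heq : cs.getD j0 ' ' = si
    · rw [if_pos heq, if_pos ⟨hj0, heq⟩]
      have hih := ih (j0+1) (arr ++ [c.getD j0 0]) (by omega)
      simp only [Nat.add_sub_cancel] at hih
      rw [hih]
      have hge := pvFindEnd_ge cs si k (j0+1)
      rw [Prod.mk.injEq]
      constructor
      · have hr : List.range' j0 (pvFindEnd cs si k (j0+1) - j0) =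
            j0 :: List.range' (j0+1) (pvFindEnd cs si k (j0+1) - (j0+1)) := by
          have : pvFindEnd cs si k (j0+1) - j0 = (pvFindEnd cs si k (j0+1) - (j0+1)) + 1 := by omega
          rw [this, List.range'_succ]
        rw [hr]
        simp
      · have : (pvFindEnd cs si k (j0+1) = j0 + 1 + k) ↔ (pvFindEnd cs si k (j0+1) = j0 + (k+1)) := by omega
        by_cases hE : pvFindEnd cs si k (j0+1) = j0 + 1 + k
        · rw [if_pos hE, if_pos (by omega)]; omega
        · rw [if_neg hE, if_neg (by omega)]
    · rw [if_neg heq, if_neg (by rintro ⟨-, h⟩; exact heq h)]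
      simp

-- the summed cost of positions i, …, len(s)-1 (index-based, so no length relation is needed)
def pvSumFrom (cs : List Char) (c : List Int) (i : Nat) : Int :=
  ((List.range' i (cs.length - i)).map (fun t => c.getD t 0)).sum

theorem pvOuterA_eq (cs : List Char) (c : List Int) :
    ∀ (f i : Nat) (cost : Int), cs.length - i ≤ f →
    pvOuterA cs c f i cost = cost + pvSumFrom cs c i - pvRunMaxes cs c i := by
  intro f
  induction f with
  | zero =>
    intro i cost h
    rw [pvRunMaxes]
    simp only [pvOuterA]
    rw [dif_neg (by omega)]
    unfold pvSumFrom
    rw [show cs.length - i = 0 from by omega]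
    simp
  | succ f ih =>
    intro i cost h
    by_cases hi : i + 1 < cs.length
    · simp only [pvOuterA]
      rw [if_pos hi]
      have hk : (i+1) + (cs.length - (i+1)) ≤ cs.length := by omega
      have hinner := pvInnerA_spec cs c (cs.getD i ' ') (cs.length - (i+1)) (i+1) [c.getD i 0] hk
      simp only [Nat.add_sub_cancel] at hinner
      rw [hinner]
      set si := cs.getD i ' ' with hsi
      set e1 := pvFindEnd cs si (cs.length - (i+1)) (i+1) with he1
      have hefuel : e1 = pvFindEnd cs si cs.length (i+1) := by
        rw [he1]
        exact pvFindEnd_fuel cs si _ _ (i+1) (by omega) (by omega)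
      have hge : i + 1 ≤ e1 := by rw [he1]; exact pvFindEnd_ge cs si _ (i+1)
      have hle : e1 ≤ cs.length := by rw [he1]; exact pvFindEnd_le cs si _ (i+1) (by omega)
      set arr := c.getD i 0 :: (List.range' (i+1) (e1 - (i+1))).map (fun t => c.getD t 0) with harr
      have harr' : [c.getD i 0] ++ (List.range' (i+1) (e1 - (i+1))).map (fun t => c.getD t 0) = arr := rfl
      set mB := (List.range' (i+1) (e1 - (i+1))).foldl
                  (fun m k => if c.getD k 0 > m then c.getD k 0 else m) (c.getD i 0) with hmB
      have hmax : mB = ((List.range' (i+1) (e1 - (i+1))).map (fun t => c.getD t 0)).foldl max (c.getD i 0) := by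
        rw [hmB, ← pvFoldIfMax, List.foldl_map]
      have hcost2 : (if 1 < arr.length then
            ((PySem.List.remove? arr ((PySem.List.max? arr (fun y => y)).getD 0)).getD arr).foldl (· + ·) cost
          else cost) = cost + arr.sum - mB := by
        by_cases hlen : 1 < arr.length
        · rw [if_pos hlen]
          have hm? : PySem.List.max? arr (fun y => y) = some (((List.range' (i+1) (e1 - (i+1))).map (fun t => c.getD t 0)).foldl max (c.getD i 0)) := by
            rw [harr]; exact PySem.List.max?_id_cons _ _
          rw [hm?, ← hmax]
          have hmem : mB ∈ arr := by
            rw [harr]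
            rcases PySem.List.foldl_max_mem ((List.range' (i+1) (e1 - (i+1))).map (fun t => c.getD t 0)) (c.getD i 0) with h1 | h1
            · rw [hmax, h1]; exact List.mem_cons_self
            · rw [hmax]; exact List.mem_cons_of_mem _ h1
          rw [Option.getD_some, PySem.List.remove?_eq_some_erase arr mB hmem, Option.getD_some]
          have hfold := PySem.List.foldl_add (arr.erase mB) (fun x => x) cost
          simp only [List.map_id'] at hfold
          rw [hfold]
          have := List.sum_erase hmem
          omega
        · rw [if_neg hlen]
          have he : e1 - (i+1) = 0 := by
            by_contra hne
            apply hlen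
            rw [harr]
            simp only [List.length_cons, List.length_map, List.length_range']
            omega
          have hm0 : mB = c.getD i 0 := by
            rw [hmB, he]; simp
          have hs0 : arr.sum = c.getD i 0 := by
            rw [harr, he]; simp
          omega
      dsimp only
      rw [harr']
      rw [hcost2]
      rw [pvRunMaxes]
      rw [dif_pos (by omega : i < cs.length)]
      rw [← hsi, ← hefuel, ← hmB]
      have hsum : arr.sum + pvSumFrom cs c e1 = pvSumFrom cs c i := by
        unfold pvSumFrom
        have hsplit : List.range' i (cs.length - i) = List.range' i (e1 - i) ++ List.range' e1 (cs.length - e1) := by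
          have happ := @List.range'_append i (e1 - i) (cs.length - e1) 1
          rw [show i + 1 * (e1 - i) = e1 from by omega,
              show (e1 - i) + (cs.length - e1) = cs.length - i from by omega] at happ
          exact happ.symm
        rw [hsplit, List.map_append, List.sum_append]
        have hr : List.range' i (e1 - i) = i :: List.range' (i+1) (e1 - (i+1)) := by
          rw [show e1 - i = (e1 - (i+1)) + 1 from by omega, List.range'_succ]
        rw [hr, harr]
        simp only [List.map_cons, List.sum_cons]
      by_cases hE : e1 = cs.length
      · rw [if_pos (by omega : e1 = i + 1 + (cs.length - (i+1)))]
        have hnext : i + 1 + (cs.length - (i + 1)) - 1 - 1 + 1 = cs.length - 1 := by omega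
        rw [hnext]
        rw [ih (cs.length - 1) _ (by omega)]
        have hlast : pvRunMaxes cs c (cs.length - 1) = c.getD (cs.length - 1) 0 := by
          rw [pvRunMaxes]
          rw [dif_pos (by omega : cs.length - 1 < cs.length)]
          have hstop : pvFindEnd cs (cs.getD (cs.length - 1) ' ') cs.length (cs.length - 1 + 1) = cs.length := by
            have h1 : cs.length - 1 + 1 = cs.length := by omega
            rw [h1]
            exact pvFindEnd_stop cs _ cs.length cs.length (le_refl _)
          rw [hstop]
          have h2 : cs.length - (cs.length - 1 + 1) = 0 := by omega
          rw [h2]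
          rw [pvRunMaxes]
          rw [dif_neg (by omega)]
          simp
        have hdlast : pvSumFrom cs c (cs.length - 1) = c.getD (cs.length - 1) 0 := by
          unfold pvSumFrom
          rw [show cs.length - (cs.length - 1) = 1 from by omega]
          simp
        rw [hlast, hdlast]
        have hde : pvSumFrom cs c e1 = 0 := by
          unfold pvSumFrom
          rw [show cs.length - e1 = 0 from by omega]
          simp
        have hrm0 : pvRunMaxes cs c e1 = 0 := by
          rw [pvRunMaxes, dif_neg (by omega)]
        rw [hde] at hsum
        omega
      · rw [if_neg (by omega : ¬ e1 = i + 1 + (cs.length - (i+1)))]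
        have hnext : e1 - 1 + 1 = e1 := by omega
        rw [hnext]
        rw [ih e1 _ (by omega)]
        omega
    · simp only [pvOuterA]
      rw [if_neg hi]
      rw [pvRunMaxes]
      by_cases hi2 : i < cs.length
      · rw [dif_pos hi2]
        have hstop : pvFindEnd cs (cs.getD i ' ') cs.length (i + 1) = cs.length := by
          have h1 : i + 1 = cs.length := by omega
          rw [h1]
          exact pvFindEnd_stop cs _ cs.length cs.length (le_refl _)
        rw [hstop]
        have h2 : cs.length - (i + 1) = 0 := by omega
        rw [h2]
        rw [pvRunMaxes, dif_neg (by omega)]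
        simp only [List.range'_zero, List.foldl_nil, add_zero]
        have hd : pvSumFrom cs c i = c.getD i 0 := by
          unfold pvSumFrom
          rw [show cs.length - i = 1 from by omega]
          simp
        rw [hd]
        omega
      · rw [dif_neg hi2]
        unfold pvSumFrom
        rw [show cs.length - i = 0 from by omega]
        simp

-- B inside one run: each equal-adjacent step adds min and keeps max, so cost+keep grows by c[k]
-- and keep tracks the running max; prev stays the run's character.
theorem pvStepB_run (cs : List Char) (c : List Int) (si : Char) :
    ∀ (ks : List Nat) (cost keep : Int), (∀ k ∈ ks, cs.getD k ' ' = si) →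
    List.foldl (pvStepB cs c) (cost, keep, some si) ks
      = (cost + (ks.map (fun k => c.getD k 0)).sum + keep - (ks.map (fun k => c.getD k 0)).foldl max keep,
         (ks.map (fun k => c.getD k 0)).foldl max keep, some si) := by
  intro ks
  induction ks with
  | nil => intro cost keep _; simp
  | cons k t ih =>
    intro cost keep hmem
    have hk : cs.getD k ' ' = si := hmem k List.mem_cons_self
    have ht : ∀ x ∈ t, cs.getD x ' ' = si := fun x hx => hmem x (List.mem_cons_of_mem _ hx)
    simp only [List.foldl_cons, List.map_cons, List.sum_cons]
    have hstep : pvStepB cs c (cost, keep, some si) k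
          = (if c.getD k 0 < keep then (cost + c.getD k 0, keep, some si)
             else (cost + keep, c.getD k 0, some si)) := by
      simp only [pvStepB]
      rw [hk, if_pos rfl]
    rw [hstep]
    by_cases hlt : c.getD k 0 < keep
    · rw [if_pos hlt, ih _ _ ht]
      have hmx : max keep (c.getD k 0) = keep := by omega
      rw [hmx]
      rw [Prod.mk.injEq]
      refine ⟨by ring, rfl⟩
    · rw [if_neg hlt, ih _ _ ht]
      have hmx : max keep (c.getD k 0) = c.getD k 0 := by omega
      rw [hmx]
      rw [Prod.mk.injEq]
      refine ⟨by ring, rfl⟩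

-- B from any run boundary: the final cost is the accumulated cost plus the remaining total
-- minus the remaining per-run maxima.
theorem pvFoldB_eq (cs : List Char) (c : List Int) :
    ∀ (f i : Nat) (cost keep : Int) (prev : Option Char), cs.length - i ≤ f →
    (i < cs.length → prev ≠ some (cs.getD i ' ')) →
    (List.foldl (pvStepB cs c) (cost, keep, prev) (List.range' i (cs.length - i))).1
      = cost + pvSumFrom cs c i - pvRunMaxes cs c i := by
  intro f
  induction f with
  | zero =>
    intro i cost keep prev h _
    rw [show cs.length - i = 0 from by omega]
    rw [pvRunMaxes, dif_neg (by omega)]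
    unfold pvSumFrom
    rw [show cs.length - i = 0 from by omega]
    simp
  | succ f ih =>
    intro i cost keep prev h hprev
    by_cases hi : i < cs.length
    · set si := cs.getD i ' ' with hsi
      set e1 := pvFindEnd cs si cs.length (i+1) with he1
      have hge : i + 1 ≤ e1 := by rw [he1]; exact pvFindEnd_ge cs si _ (i+1)
      have hle : e1 ≤ cs.length := by rw [he1]; exact pvFindEnd_le cs si _ (i+1) (by omega)
      have hsplit : List.range' i (cs.length - i)
          = i :: (List.range' (i+1) (e1 - (i+1)) ++ List.range' e1 (cs.length - e1)) := by
        have happ := @List.range'_append (i+1) (e1 - (i+1)) (cs.length - e1) 1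
        rw [show (i+1) + 1 * (e1 - (i+1)) = e1 from by omega,
            show (e1 - (i+1)) + (cs.length - e1) = cs.length - (i+1) from by omega] at happ
        rw [show cs.length - i = (cs.length - (i+1)) + 1 from by omega, List.range'_succ, ← happ]
      rw [hsplit]
      simp only [List.foldl_cons]
      have hstep : pvStepB cs c (cost, keep, prev) i = (cost, c.getD i 0, some si) := by
        simp only [pvStepB]
        rw [← hsi, if_neg (fun hcontra => hprev hi hcontra.symm)]
      rw [hstep]
      rw [List.foldl_append]
      have hmemrun : ∀ k ∈ List.range' (i+1) (e1 - (i+1)), cs.getD k ' ' = si := by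
        intro k hk
        rw [List.mem_range'] at hk
        obtain ⟨t, ht, hkeq⟩ := hk
        exact pvFindEnd_mem cs si cs.length (i+1) k (by omega) (by rw [← he1]; omega)
      rw [pvStepB_run cs c si _ cost (c.getD i 0) hmemrun]
      set S := ((List.range' (i+1) (e1 - (i+1))).map (fun k => c.getD k 0)).sum with hS
      set M := ((List.range' (i+1) (e1 - (i+1))).map (fun k => c.getD k 0)).foldl max (c.getD i 0) with hM
      have hnextprev : e1 < cs.length → (some si : Option Char) ≠ some (cs.getD e1 ' ') := by
        intro he
        intro hcontra
        have := pvFindEnd_break cs si cs.length (i+1) (by omega) (by rw [← he1]; exact he)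
        rw [← he1] at this
        exact this (Option.some.injEq _ _ ▸ hcontra).symm
      rw [ih e1 _ M (some si) (by omega) hnextprev]
      have hmax : (List.range' (i+1) (e1 - (i+1))).foldl
          (fun m k => if c.getD k 0 > m then c.getD k 0 else m) (c.getD i 0) = M := by
        rw [hM, ← pvFoldIfMax, List.foldl_map]
      have hrmi : pvRunMaxes cs c i = M + pvRunMaxes cs c e1 := by
        conv_lhs => rw [pvRunMaxes]
        rw [dif_pos hi, ← hsi, ← he1, hmax]
      have hsum : c.getD i 0 + S + pvSumFrom cs c e1 = pvSumFrom cs c i := by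
        unfold pvSumFrom
        have hsplit2 : List.range' i (cs.length - i) = List.range' i (e1 - i) ++ List.range' e1 (cs.length - e1) := by
          have happ := @List.range'_append i (e1 - i) (cs.length - e1) 1
          rw [show i + 1 * (e1 - i) = e1 from by omega,
              show (e1 - i) + (cs.length - e1) = cs.length - i from by omega] at happ
          exact happ.symm
        rw [hsplit2, List.map_append, List.sum_append]
        have hr : List.range' i (e1 - i) = i :: List.range' (i+1) (e1 - (i+1)) := by
          rw [show e1 - i = (e1 - (i+1)) + 1 from by omega, List.range'_succ]
        rw [hr]
        simp only [List.map_cons, List.sum_cons, hS]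
      omega
    · rw [show cs.length - i = 0 from by omega]
      rw [pvRunMaxes, dif_neg (by omega)]
      unfold pvSumFrom
      rw [show cs.length - i = 0 from by omega]
      simp

-- ===== VERDICT (by name: the statement is the Claim_ definition above) =====
theorem solution_spec : Claim_equal_solution := by
  intro s c _ _
  unfold Spec_solution solution solution_alt
  rw [pvOuterA_eq s.toList c s.toList.length 0 0 (by omega)]
  rw [List.range_eq_range']
  rw [show List.range' 0 s.toList.length = List.range' 0 (s.toList.length - 0) from by rw [Nat.sub_zero]]
  rw [pvFoldB_eq s.toList c s.toList.length 0 0 0 none (by omega) (by intro _ h; cases h)]
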